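-- pv_equiv track=rewrite | github.com/IgorTelles9/BMT-VectorialModelSystem | buscador.py | getRanks
-- ===== SOURCE A (Python) =====
-- def getRanks(distances):
--     ranked_distances = sorted(distances, reverse=True)
--     positions = []
--     for dist in distances:
--         index = ranked_distances.index(dist)
--         positions.append(index)
--         ranked_distances[index] = -1
--     return positions
-- ===== SOURCE B (Python) =====
-- def getRanks(distances):
--     seen = {}
--     positions = []
--     for d in distances:
--         k = seen.get(d, 0)
--         seen[d] = k + 1
--         positions.append(k + len([x for x in distances if x > d]))
--     return positions
-- ===== Notes on version B (the rewrite author's own statement) =====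
-- stated objective: alternative
-- what changed: B computes each rank directly as (#elements greater) + (#earlier equal occurrences) with a single occurrence-counter dict, instead of A's sort-then-repeated .index with destructive -1 sentinel overwrites.
-- intended difference: On lists where a -1 occurs after some element greater than or equal to -1, A's -1 sentinel overwrite collides with the genuine value -1 and A returns a stale, too-small and possibly repeated index for that -1, while B returns the true descending-rank position, which is the intended tie-consuming rank. — e.g. on getRanks([5, -1]): A returns [0, 0], B returns [0, 1]
import Mathlib
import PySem

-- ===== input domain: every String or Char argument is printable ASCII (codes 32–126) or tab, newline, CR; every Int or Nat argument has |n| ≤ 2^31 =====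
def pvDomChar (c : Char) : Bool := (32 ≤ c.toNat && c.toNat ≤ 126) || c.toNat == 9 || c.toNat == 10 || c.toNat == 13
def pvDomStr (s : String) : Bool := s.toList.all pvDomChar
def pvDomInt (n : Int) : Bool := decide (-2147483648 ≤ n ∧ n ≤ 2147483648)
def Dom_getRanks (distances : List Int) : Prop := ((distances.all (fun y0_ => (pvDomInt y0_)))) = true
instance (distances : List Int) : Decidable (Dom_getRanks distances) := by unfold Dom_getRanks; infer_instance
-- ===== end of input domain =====

-- B replaces A's sort + destructive .index/-1-sentinel loop by a direct count-based rank
-- formula with an occurrence-counter dict (alternative algorithm, same asymptotic cost);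
-- where A's -1 sentinel collides with a genuine value -1, B returns the intended rank (see D_).

-- ===== PORT A =====
-- loop body of A: index = ranked.index(dist); positions.append(index); ranked[index] = -1
def stepA (st : List Int × List Int) (dist : Int) : List Int × List Int :=
  match PySem.List.index? st.1 dist with
  | some index => (st.1.set index (-1), st.2 ++ [(index : Int)])
  | none => st  -- unreachable: Python would raise ValueError; every dist remains present in ranked

def getRanks (distances : List Int) : List Int :=
  let ranked := PySem.List.sorted distances (fun x => x) true
  (distances.foldl stepA (ranked, [])).2

def stepB (distances : List Int) (st : PySem.Dict Int Int × List Int) (d : Int) :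
    PySem.Dict Int Int × List Int :=
  let k := st.1.getD d 0
  (st.1.insert d (k + 1), st.2 ++ [k + ((distances.filter (fun x => decide (d < x))).length : Int)])

def getRanks_alt (distances : List Int) : List Int :=
  (distances.foldl (stepB distances) (PySem.Dict.empty, [])).2

-- ===== PRECONDITION & SPEC =====
-- On lists where a -1 occurs after some element ≥ -1, A's -1 sentinel overwrite collides with
-- the genuine value -1 and A returns a stale, too-small (possibly repeated) index for that -1;
-- B returns the true descending-rank position, which is the intended tie-consuming rank.
def D_getRanks (distances : List Int) : Prop :=
  ∃ j : Fin distances.length, distances.get j = -1 ∧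
    ∃ i : Fin distances.length, (i : Nat) < (j : Nat) ∧ -1 ≤ distances.get i
instance (distances : List Int) : Decidable (D_getRanks distances) := by
  unfold D_getRanks; infer_instance

def Spec_getRanks (distances : List Int) (out : List Int) : Prop :=
  ¬ D_getRanks distances → out = getRanks_alt distances
instance (distances : List Int) (out : List Int) : Decidable (Spec_getRanks distances out) := by
  unfold Spec_getRanks; infer_instance

def pvDiffWitness_getRanks : List Int := [5, -1]
def pvDiffWitnessOut_getRanks : (List Int) × (List Int) := ([0, 0], [0, 1])

-- ===== CLAIM (what is proved, stated in full; the proofs are below) =====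
def Claim_unchanged_getRanks : Prop :=
  ∀ (distances : List Int), Dom_getRanks distances → Spec_getRanks distances (getRanks distances)
def Claim_changed_getRanks : Prop :=
  Dom_getRanks (pvDiffWitness_getRanks) ∧ D_getRanks (pvDiffWitness_getRanks) ∧
  getRanks (pvDiffWitness_getRanks) = pvDiffWitnessOut_getRanks.1 ∧
  getRanks_alt (pvDiffWitness_getRanks) = pvDiffWitnessOut_getRanks.2 ∧
  pvDiffWitnessOut_getRanks.1 ≠ pvDiffWitnessOut_getRanks.2

-- ===== LEMMAS AND PROOFS =====
def gcnt (L : List Int) (v : Int) : Nat := L.countP (fun x => decide (v < x))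

-- generic: in a descending list, an up-closed predicate holds at j iff j < countP
lemma desc_countP_char (S : List Int) (hS : S.Pairwise (fun a b => b ≤ a))
    (P : Int → Bool) (hmono : ∀ a b : Int, a ≤ b → P a = true → P b = true) :
    ∀ j (hj : j < S.length), (P S[j] = true ↔ j < S.countP P) := by
  induction S with
  | nil => intro j hj; simp at hj
  | cons x t ih =>
    intro j hj
    rcases List.pairwise_cons.mp hS with ⟨hx, ht⟩
    cases j with
    | zero =>
      simp only [List.getElem_cons_zero, List.countP_cons]
      constructor
      · intro h; simp [h]
      · intro h
        by_contra hpx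
        have h0 : t.countP P = 0 :=
          List.countP_eq_zero.mpr (fun y hy hPy => hpx (hmono y x (hx y hy) hPy))
        simp [h0, hpx] at h
    | succ j =>
      have hj' : j < t.length := by simpa using hj
      have hih := ih ht j hj'
      simp only [List.getElem_cons_succ, List.countP_cons]
      by_cases hpx : P x = true
      · simp only [hpx, if_pos]
        constructor
        · intro h; have := hih.mp h; omega
        · intro h; exact hih.mpr (by omega)
      · have hne : P t[j] = false := by
          by_contra hc
          exact hpx (hmono t[j] x (hx t[j] (List.getElem_mem hj')) (by simpa using hc))
        have h0 : t.countP P = 0 :=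
          List.countP_eq_zero.mpr (fun y hy hPy => hpx (hmono y x (hx y hy) hPy))
        simp [hne, h0, hpx]

lemma countP_le_split (L : List Int) (v : Int) :
    L.countP (fun x => decide (v ≤ x)) = gcnt L v + L.count v := by
  induction L with
  | nil => simp [gcnt]
  | cons x t ih =>
    simp only [gcnt, List.countP_cons, List.count_cons] at *
    rw [ih]
    split_ifs <;> simp_all <;> omega

lemma S_gt_iff (L : List Int) (v : Int) (j : Nat)
    (hj : j < (PySem.List.sorted L (fun x => x) true).length) :
    (v < (PySem.List.sorted L (fun x => x) true)[j] ↔ j < gcnt L v) := by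
  have hp := PySem.List.sorted_pairwise_rev (xs := L) (key := fun x => x)
  have hperm := PySem.List.sorted_perm (xs := L) (key := fun x => x) (rev := true)
  have h := desc_countP_char _ hp (fun x => decide (v < x))
    (fun a b hab h => by simp at *; omega) j hj
  rw [hperm.countP_eq] at h
  simpa [gcnt] using h

lemma S_ge_iff (L : List Int) (v : Int) (j : Nat)
    (hj : j < (PySem.List.sorted L (fun x => x) true).length) :
    (v ≤ (PySem.List.sorted L (fun x => x) true)[j] ↔ j < gcnt L v + L.count v) := by
  have hp := PySem.List.sorted_pairwise_rev (xs := L) (key := fun x => x)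
  have hperm := PySem.List.sorted_perm (xs := L) (key := fun x => x) (rev := true)
  have h := desc_countP_char _ hp (fun x => decide (v ≤ x))
    (fun a b hab h => by simp at *; omega) j hj
  rw [hperm.countP_eq, countP_le_split] at h
  simpa using h

lemma S_eq_iff (L : List Int) (v : Int) (j : Nat)
    (hj : j < (PySem.List.sorted L (fun x => x) true).length) :
    ((PySem.List.sorted L (fun x => x) true)[j] = v ↔
      gcnt L v ≤ j ∧ j < gcnt L v + L.count v) := by
  have h1 := S_gt_iff L v j hj
  have h2 := S_ge_iff L v j hj
  constructor
  · intro h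
    refine ⟨?_, h2.mp (le_of_eq h.symm)⟩
    by_contra hc
    have := h1.mpr (by omega)
    omega
  · intro ⟨ha, hb⟩
    have hge : v ≤ _ := h2.mpr hb
    have hgt : ¬ v < (PySem.List.sorted L (fun x => x) true)[j] := fun hc => by
      have := h1.mp hc; omega
    omega

lemma ge_gcnt_self (L : List Int) (j : Nat)
    (hj : j < (PySem.List.sorted L (fun x => x) true).length) :
    gcnt L ((PySem.List.sorted L (fun x => x) true)[j]) ≤ j := by
  by_contra hc
  have := (S_gt_iff L ((PySem.List.sorted L (fun x => x) true)[j]) j hj).mpr (by omega)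
  omega

def Rst (L : List Int) (p : List Int) : List Int :=
  (PySem.List.sorted L (fun x => x) true).mapIdx
    (fun j s => if j < gcnt L s + p.count s then -1 else s)

lemma length_Rst (L p : List Int) :
    (Rst L p).length = (PySem.List.sorted L (fun x => x) true).length := by
  simp [Rst]

lemma getElem_Rst (L p : List Int) (j : Nat) (hj : j < (Rst L p).length) :
    (Rst L p)[j] =
      (if j < gcnt L ((PySem.List.sorted L (fun x => x) true)[j]'(by simpa [Rst] using hj)) +
          p.count ((PySem.List.sorted L (fun x => x) true)[j]'(by simpa [Rst] using hj))
       then -1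
       else (PySem.List.sorted L (fun x => x) true)[j]'(by simpa [Rst] using hj)) := by
  simp [Rst]

lemma Rst_nil (L : List Int) : Rst L [] = PySem.List.sorted L (fun x => x) true := by
  apply List.ext_getElem
  · simp [Rst]
  · intro j hj hj'
    rw [getElem_Rst]
    have := ge_gcnt_self L j hj'
    simp only [List.count_nil]
    omega

lemma not_D_prefix (p r : List Int) (hD : ¬ D_getRanks (p ++ (-1) :: r)) :
    ∀ x ∈ p, x < -1 := by
  intro x hx
  by_contra hge
  rw [not_lt] at hge
  apply hD
  obtain ⟨i, hi, hxi⟩ := List.getElem_of_mem hx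
  have hlen : (p ++ (-1) :: r).length = p.length + (r.length + 1) := by simp
  refine ⟨⟨p.length, by omega⟩, ?_, ⟨⟨i, by omega⟩, by simpa using hi, ?_⟩⟩
  · simp [List.get_eq_getElem, List.getElem_append_right (le_refl p.length)]
  · simp [List.get_eq_getElem, List.getElem_append_left hi, hxi, hge]

lemma index_Rst (L p r : List Int) (d : Int) (hL : L = p ++ d :: r)
    (hD : ¬ D_getRanks L) :
    PySem.List.index? (Rst L p) d = some (gcnt L d + p.count d) := by
  have hSlen : (PySem.List.sorted L (fun x => x) true).length = L.length :=
    PySem.List.length_sorted L (fun x => x) true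
  have hcount : p.count d + 1 ≤ L.count d := by
    subst hL; simp [List.count_append]
  have hlen : gcnt L d + L.count d ≤ L.length := by
    rw [← countP_le_split]; exact List.countP_le_length
  have hjs : gcnt L d + p.count d < (PySem.List.sorted L (fun x => x) true).length := by omega
  have hS : (PySem.List.sorted L (fun x => x) true)[gcnt L d + p.count d] = d :=
    (S_eq_iff L d _ hjs).mpr ⟨by omega, by omega⟩
  have hval : (Rst L p)[gcnt L d + p.count d]'(by rw [length_Rst]; exact hjs) = d := by
    rw [getElem_Rst]; rw [hS]
    simp
  have hbefore : ∀ j (hj : j < gcnt L d + p.count d),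
      (Rst L p)[j]'(by rw [length_Rst]; omega) ≠ d := by
    intro j hj
    have hj' : j < (PySem.List.sorted L (fun x => x) true).length := by omega
    rw [getElem_Rst]
    set s := (PySem.List.sorted L (fun x => x) true)[j]'(by simpa [Rst, length_Rst] using hj') with hs
    split_ifs with hcond
    · -- consumed slot: holds -1
      by_cases hd : d = -1
      · subst hd
        exfalso
        have hplt : ∀ x ∈ p, x < -1 := not_D_prefix p r (hL ▸ hD)
        have hp0 : p.count (-1) = 0 :=
          List.count_eq_zero.mpr (fun hmem => absurd (hplt _ hmem) (by omega))
        have hgj : gcnt L s ≤ j := ge_gcnt_self L j hj'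
        have hsp : s ∈ p := by
          have : 0 < p.count s := by omega
          exact List.count_pos_iff.mp this
        have hslt : s < -1 := hplt s hsp
        have hmono : gcnt L (-1) + L.count (-1) ≤ gcnt L s := by
          rw [← countP_le_split]
          exact List.countP_mono_left (fun x _ hx => by simp at *; omega)
        have hm1 : 0 < L.count (-1) := by
          rw [List.count_pos_iff]
          subst hL; exact List.mem_append_right _ (List.mem_cons_self)
        omega
      · intro hc; exact hd (by omega)
    · -- preserved slot: holds s ≠ d (else j would be beyond the consumed front)
      intro hc
      have := (S_eq_iff L d j hj').mp (by rw [← hs]; exact hc)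
      rw [hc] at hcond
      omega
  -- assemble index? = some j*
  rw [PySem.List.index?_eq_some_iff]
  refine ⟨(Rst L p).take (gcnt L d + p.count d), (Rst L p).drop (gcnt L d + p.count d + 1),
    ?_, ?_, ?_⟩
  · conv_lhs => rw [← List.take_append_drop (gcnt L d + p.count d) (Rst L p)]
    congr 1
    rw [List.drop_eq_getElem_cons (by rw [length_Rst]; omega), hval]
  · rw [List.length_take]
    have : (Rst L p).length = L.length := by rw [length_Rst]; omega
    omega
  · intro hmem
    obtain ⟨i, hi, hie⟩ := List.getElem_of_mem hmem
    have hi' : i < gcnt L d + p.count d := by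
      have := List.length_take (i := gcnt L d + p.count d) (l := Rst L p); omega
    apply hbefore i hi'
    simp only [List.getElem_take] at hie
    exact hie

lemma Rst_append (L p r : List Int) (d : Int) (hL : L = p ++ d :: r) :
    Rst L (p ++ [d]) = (Rst L p).set (gcnt L d + p.count d) (-1) := by
  have hSlen : (PySem.List.sorted L (fun x => x) true).length = L.length :=
    PySem.List.length_sorted L (fun x => x) true
  have hcount : p.count d + 1 ≤ L.count d := by
    subst hL; simp [List.count_append]
  have hlen : gcnt L d + L.count d ≤ L.length := by
    rw [← countP_le_split]; exact List.countP_le_length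
  apply List.ext_getElem
  · simp [Rst]
  · intro j hj1 hj2
    have hj' : j < (PySem.List.sorted L (fun x => x) true).length := by
      simpa [List.length_set, length_Rst] using hj2
    rw [List.getElem_set, getElem_Rst, getElem_Rst]
    set s := (PySem.List.sorted L (fun x => x) true)[j]'(by simpa [Rst, length_Rst] using hj') with hs
    have hcnt : (p ++ [d]).count s = p.count s + if s = d then 1 else 0 := by
      rcases eq_or_ne s d with h|h
      · subst h; simp [List.count_append]
      · simp [List.count_append, h, List.count_eq_zero.mpr (by simp [h] : s ∉ [d])]
    by_cases hsd : s = d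
    · have hcnt2 : (p ++ [d]).count s = p.count s + 1 := by rw [hcnt, if_pos hsd]
      have hblock := (S_eq_iff L d j hj').mp (by rw [← hs]; exact hsd)
      have e1 : gcnt L s = gcnt L d := by rw [hsd]
      have e2 : p.count s = p.count d := by rw [hsd]
      rw [hcnt2]
      split_ifs <;> omega
    · have hcnt2 : (p ++ [d]).count s = p.count s := by rw [hcnt, if_neg hsd]; omega
      have hjj : ¬ (gcnt L d + p.count d = j) := by
        intro h
        apply hsd
        rw [hs]
        exact (S_eq_iff L d j hj').mpr ⟨by omega, by omega⟩
      rw [hcnt2, if_neg hjj]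

def specTail (L : List Int) : List Int → List Int → List Int
  | _, [] => []
  | p, d :: r => ((gcnt L d + p.count d : Nat) : Int) :: specTail L (p ++ [d]) r

lemma foldA (L : List Int) (hD : ¬ D_getRanks L) :
    ∀ (r p acc : List Int), L = p ++ r →
      (r.foldl stepA (Rst L p, acc)).2 = acc ++ specTail L p r := by
  intro r
  induction r with
  | nil => intro p acc _; simp [specTail]
  | cons d r' ih =>
    intro p acc hL
    rw [List.foldl_cons]
    have hidx := index_Rst L p r' d hL hD
    simp only [stepA, hidx]
    rw [← Rst_append L p r' d hL]
    rw [ih (p ++ [d]) (acc ++ [((gcnt L d + p.count d : Nat) : Int)]) (by rw [hL]; simp)]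
    simp [specTail]

lemma foldB (L : List Int) :
    ∀ (r p : List Int) (dct : PySem.Dict Int Int) (acc : List Int),
      (∀ v : Int, dct.getD v 0 = (p.count v : Int)) →
      (r.foldl (stepB L) (dct, acc)).2 = acc ++ specTail L p r := by
  intro r
  induction r with
  | nil => intro p dct acc _; simp [specTail]
  | cons d r' ih =>
    intro p dct acc hdct
    rw [List.foldl_cons]
    simp only [stepB, hdct d]
    have hflt : ((L.filter (fun x => decide (d < x))).length : Int) = (gcnt L d : Int) := by
      rw [← List.countP_eq_length_filter]; rfl
    rw [hflt]
    have hinv : ∀ v : Int,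
        (dct.insert d ((p.count d : Int) + 1)).getD v 0 = ((p ++ [d]).count v : Int) := by
      intro v
      rw [PySem.Dict.getD_insert]
      rcases eq_or_ne v d with h | h
      · subst h; rw [if_pos rfl]; simp [List.count_append]
      · rw [if_neg h, hdct v]
        simp [List.count_append, List.count_eq_zero.mpr (by simp [h] : v ∉ [d])]
    rw [ih (p ++ [d]) _ (acc ++ [(p.count d : Int) + (gcnt L d : Int)]) hinv]
    simp [specTail]
    ring

lemma getRanks_eq_spec (L : List Int) (hD : ¬ D_getRanks L) :
    getRanks L = specTail L [] L := by
  unfold getRanks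
  rw [← Rst_nil L]
  simpa using foldA L hD L [] [] (by simp)

lemma getRanks_alt_eq_spec (L : List Int) :
    getRanks_alt L = specTail L [] L := by
  unfold getRanks_alt
  simpa using foldB L L [] PySem.Dict.empty [] (by intro v; simp [PySem.Dict.getD_empty])

-- ===== VERDICT (by name: the statement is the Claim_ definition above) =====
theorem getRanks_spec : Claim_unchanged_getRanks := by
  intro L _ hD
  show getRanks L = getRanks_alt L
  rw [getRanks_eq_spec L hD, getRanks_alt_eq_spec L]

theorem getRanks_changed : Claim_changed_getRanks := by
  unfold Claim_changed_getRanks; decide
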